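-- pv_equiv track=rewrite | github.com/I-AM-IRONMAN-10/Python | practical test.py | generate_date_pins
-- ===== SOURCE A (Python) =====
-- from itertools import combinations
--
-- def extract_date_digits(date):
--
--     return list(date.replace("-", ""))
--
-- def generate_date_pins(dates, pin_length):
--
--     all_combinations_2part = {}
--     all_combinations_1part = {}
--
--     for date in dates:
--         digits = extract_date_digits(date)
--
--         for r in range(2, len(digits) + 1):
--             for combo in combinations(digits, r):
--                 pin = "".join(combo)
--                 if len(pin) == pin_length:
--                     all_combinations_2part[pin] = combo
--
--         for r in range(1, len(digits) + 1):
--             for combo in combinations(digits, r):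
--                 pin = "".join(combo)
--                 if len(pin) == pin_length and pin not in all_combinations_2part:
--                     all_combinations_1part[pin] = combo
--
--     return all_combinations_2part, all_combinations_1part
-- ===== SOURCE B (Python) =====
-- from itertools import combinations
--
-- def generate_date_pins(dates, pin_length):
--     # Only combinations of exactly pin_length digits can ever match, and for
--     # pin_length >= 2 the "1part" dict can never receive a key (every matching
--     # pin was just inserted into the "2part" dict), so iterate only r == pin_length.
--     pins_2part = {}
--     pins_1part = {}
--     if pin_length >= 2:
--         for date in dates:
--             digits = list(date.replace("-", ""))
--             if pin_length <= len(digits):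
--                 for combo in combinations(digits, pin_length):
--                     pins_2part["".join(combo)] = combo
--     elif pin_length == 1:
--         for date in dates:
--             for ch in date.replace("-", ""):
--                 pins_1part[ch] = (ch,)
--     return pins_2part, pins_1part
-- ===== Notes on version B (the rewrite author's own statement) =====
-- stated objective: faster
-- what changed: Instead of enumerating every combination of every length r (2^n per date) and filtering by joined-string length, B iterates only combinations(digits, pin_length) to build the first dict when pin_length >= 2, and fills the second dict directly from single digits when pin_length == 1 (for pin_length >= 2 the second dict is provably always empty, since every matching pin was just inserted into the first).
import Mathlib
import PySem

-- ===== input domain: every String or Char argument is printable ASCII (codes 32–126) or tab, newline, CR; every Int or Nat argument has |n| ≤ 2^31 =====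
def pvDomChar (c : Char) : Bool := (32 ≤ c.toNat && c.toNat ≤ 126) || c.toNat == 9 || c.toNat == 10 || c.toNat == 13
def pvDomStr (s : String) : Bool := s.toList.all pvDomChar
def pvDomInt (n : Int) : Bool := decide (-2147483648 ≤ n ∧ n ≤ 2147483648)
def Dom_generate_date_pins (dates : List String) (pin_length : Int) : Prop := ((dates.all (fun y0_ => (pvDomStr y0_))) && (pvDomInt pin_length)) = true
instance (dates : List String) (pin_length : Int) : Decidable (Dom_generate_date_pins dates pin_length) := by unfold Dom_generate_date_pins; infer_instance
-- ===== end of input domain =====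

-- B iterates only combinations(digits, pin_length) (A enumerates all lengths and filters);
-- for pin_length >= 2 the second dict is provably always empty, for pin_length == 1 it is
-- filled directly from the single digits. Objective: faster (asymptotic, measured).

-- ===== PORT A =====
def pvExtractDateDigits (date : String) : List String :=
  (PySem.Str.replace date "-" "").toList.map (fun c => String.ofList [c])

def generate_date_pins (dates : List String) (pin_length : Int) :
    (List (String × List String)) × (List (String × List String)) :=
  let fin := dates.foldl
    (fun (st : PySem.Dict String (List String) × PySem.Dict String (List String)) date =>
      let digits := pvExtractDateDigits date
      let d1 := (PySem.List.pyRange 2 (PySem.List.len digits + 1)).foldl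
        (fun d1 r =>
          (PySem.List.combinations digits r.toNat).foldl
            (fun d1 combo =>
              let pin := PySem.Str.join "" combo
              if PySem.Str.len pin == pin_length then d1.insert pin combo else d1)
            d1)
        st.1
      let d2 := (PySem.List.pyRange 1 (PySem.List.len digits + 1)).foldl
        (fun d2 r =>
          (PySem.List.combinations digits r.toNat).foldl
            (fun d2 combo =>
              let pin := PySem.Str.join "" combo
              if PySem.Str.len pin == pin_length && !(d1.contains pin) then d2.insert pin combo
              else d2)
            d2)
        st.2
      (d1, d2))
    (PySem.Dict.empty, PySem.Dict.empty)
  (fin.1.items, fin.2.items)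

-- ===== PORT B =====
def generate_date_pins_alt (dates : List String) (pin_length : Int) :
    (List (String × List String)) × (List (String × List String)) :=
  let pins2 : PySem.Dict String (List String) :=
    if 2 ≤ pin_length then
      dates.foldl
        (fun d date =>
          let digits := (PySem.Str.replace date "-" "").toList.map (fun c => String.ofList [c])
          if pin_length ≤ PySem.List.len digits then
            (PySem.List.combinations digits pin_length.toNat).foldl
              (fun d combo => d.insert (PySem.Str.join "" combo) combo) d
          else d)
        PySem.Dict.empty
    else PySem.Dict.empty
  let pins1 : PySem.Dict String (List String) :=
    if pin_length = 1 then
      dates.foldl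
        (fun d date =>
          (PySem.Str.replace date "-" "").toList.foldl
            (fun d c => d.insert (String.ofList [c]) [String.ofList [c]]) d)
        PySem.Dict.empty
    else PySem.Dict.empty
  (pins2.items, pins1.items)

-- ===== PRECONDITION & SPEC =====
def Spec_generate_date_pins (dates : List String) (pin_length : Int) (out : (List (String × List String)) × (List (String × List String))) : Prop := out = generate_date_pins_alt dates pin_length
instance (dates : List String) (pin_length : Int) (out : (List (String × List String)) × (List (String × List String))) : Decidable (Spec_generate_date_pins dates pin_length out) := by unfold Spec_generate_date_pins; infer_instance

-- ===== CLAIM (what is proved, stated in full; the proofs are below) =====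
def Claim_equal_generate_date_pins : Prop := ∀ (dates : List String) (pin_length : Int), Dom_generate_date_pins dates pin_length → Spec_generate_date_pins dates pin_length (generate_date_pins dates pin_length)

-- ===== LEMMAS AND PROOFS =====

-- the pin built from a combination of single-character digit strings
lemma pv_pin_toList (co : List Char) :
    (PySem.Str.join "" (co.map (fun c => String.ofList [c]))).toList = co := by
  rw [PySem.Str.toList_join]
  have h : (String.toList ∘ fun c => String.ofList [c]) = fun c : Char => [c] := by
    funext c; simp
  have h0 : "".toList = ([] : List Char) := rfl
  rw [List.map_map, h, h0, PySem.Chars.join_nil_singletons]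

lemma pv_pin_len (co : List Char) :
    PySem.Str.len (PySem.Str.join "" (co.map (fun c => String.ofList [c]))) = (co.length : Int) := by
  rw [PySem.Str.len_eq, pv_pin_toList]

lemma pv_pin_singleton (c : Char) :
    PySem.Str.join "" [String.ofList [c]] = String.ofList [c] := by
  apply String.toList_inj.mp
  have h := pv_pin_toList [c]
  simp only [List.map_singleton] at h
  rw [h]
  simp

-- A's inner fold over combinations of a fixed size r: only r = pin_length contributes
lemma pv_innerA (cs : List Char) (r : Nat) (k : Int)
    (d : PySem.Dict String (List String)) :
    (PySem.List.combinations (cs.map (fun c => String.ofList [c])) r).foldl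
      (fun d combo =>
        if PySem.Str.len (PySem.Str.join "" combo) == k then d.insert (PySem.Str.join "" combo) combo else d) d
    = if (r : Int) = k then
        (PySem.List.combinations (cs.map (fun c => String.ofList [c])) r).foldl
          (fun d combo => d.insert (PySem.Str.join "" combo) combo) d
      else d := by
  rw [PySem.List.combinations_map, List.foldl_map, List.foldl_map]
  rw [PySem.List.foldl_congr_mem _ _
    (fun d co => if (co.length : Int) = k then d.insert (PySem.Str.join "" (co.map (fun c => String.ofList [c]))) (co.map (fun c => String.ofList [c])) else d) d
    (by
      intro acc co hco
      simp only [pv_pin_len, beq_iff_eq])]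
  by_cases h : (r : Int) = k
  · simp only [if_pos h]
    apply PySem.List.foldl_congr_mem
    intro acc co hco
    have := PySem.List.length_of_mem_combinations hco
    rw [if_pos (by rw [this]; exact h)]
  · simp only [if_neg h]
    rw [PySem.List.foldl_congr_mem _ _ (fun acc _ => acc) d
      (by
        intro acc co hco
        have := PySem.List.length_of_mem_combinations hco
        rw [if_neg (by rw [this]; exact h)]),
      PySem.List.foldl_ignore]

-- a range fold that is the identity past k
lemma pv_range_skip {D : Type} (k : Int) (F : Int → D → D) (b : Int) :
    ∀ (a : Int) (d : D), k < a →
      (PySem.List.pyRange a b).foldl (fun d r => if r = k then F r d else d) d = d := by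
  intro a d h
  rw [PySem.List.foldl_congr_mem _ _ (fun acc _ => acc) d
    (by
      intro acc r hr
      rw [PySem.List.mem_pyRange_one] at hr
      rw [if_neg (by omega)]),
    PySem.List.foldl_ignore]

-- a range fold applying F exactly at k (if k is in range)
lemma pv_range_if {D : Type} (k : Int) (F : Int → D → D) :
    ∀ (n : Nat) (a b : Int), (b - a).toNat = n → ∀ (d : D),
      (PySem.List.pyRange a b).foldl (fun d r => if r = k then F r d else d) d
      = if a ≤ k ∧ k < b then F k d else d := by
  intro n
  induction n with
  | zero =>
    intro a b hab d
    rw [PySem.List.foldl_congr_mem _ _ (fun acc _ => acc) d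
      (by
        intro acc r hr
        rw [PySem.List.mem_pyRange_one] at hr
        rw [if_neg (by omega)]),
      PySem.List.foldl_ignore, if_neg (by omega)]
  | succ m ih =>
    intro a b hab d
    rw [PySem.List.pyRange_one_cons (by omega), List.foldl_cons]
    by_cases h : a = k
    · rw [if_pos h, h]
      rw [pv_range_skip k F b (k + 1) (F k d) (by omega)]
      rw [if_pos (by omega)]
    · rw [if_neg h, ih (a + 1) b (by omega) d]
      have : (a + 1 ≤ k ∧ k < b) ↔ (a ≤ k ∧ k < b) := by omega
      simp only [this]

-- after an insertion fold over a list of combos, every joined pin of the list is a key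
lemma pv_contains_mono (L : List (List String)) (d : PySem.Dict String (List String))
    (p : String) (h : d.contains p = true) :
    (L.foldl (fun d c => d.insert (PySem.Str.join "" c) c) d).contains p = true := by
  induction L generalizing d with
  | nil => exact h
  | cons a L ih =>
    rw [List.foldl_cons]
    exact ih _ (by rw [PySem.Dict.contains_insert]; simp [h])

lemma pv_contains_after (L : List (List String)) (d : PySem.Dict String (List String))
    (co : List String) (h : co ∈ L) :
    (L.foldl (fun d c => d.insert (PySem.Str.join "" c) c) d).contains (PySem.Str.join "" co) = true := by
  induction L generalizing d with
  | nil => cases h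
  | cons a L ih =>
    rw [List.foldl_cons]
    rcases List.mem_cons.mp h with h | h
    · subst h
      exact pv_contains_mono L _ _ (PySem.Dict.contains_insert_self _ _ _)
    · exact ih _ h

-- A's second loop is the identity whenever every pin of size pin_length is already a key of d1
lemma pv_second_loop (cs : List Char) (k : Int)
    (d1 d2 : PySem.Dict String (List String))
    (hcont : ∀ co ∈ PySem.List.combinations (cs.map (fun c => String.ofList [c])) k.toNat,
        d1.contains (PySem.Str.join "" co) = true) :
    (PySem.List.pyRange 1 ((cs.map (fun c => String.ofList [c])).length + 1)).foldl
      (fun d2 r =>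
        (PySem.List.combinations (cs.map (fun c => String.ofList [c])) r.toNat).foldl
          (fun d2 combo =>
            if PySem.Str.len (PySem.Str.join "" combo) == k && !(d1.contains (PySem.Str.join "" combo))
            then d2.insert (PySem.Str.join "" combo) combo else d2)
          d2)
      d2 = d2 := by
  rw [PySem.List.foldl_congr_mem _ _ (fun acc _ => acc) d2
    (by
      intro acc r hr
      rw [PySem.List.mem_pyRange_one] at hr
      rw [PySem.List.foldl_congr_mem _ _ (fun acc _ => acc) acc
        (by
          intro acc' combo hcombo
          rw [PySem.List.combinations_map, List.mem_map] at hcombo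
          obtain ⟨co, hco, rfl⟩ := hcombo
          have hlen := PySem.List.length_of_mem_combinations hco
          by_cases h : (r : Int) = k
          · have hr' : r.toNat = k.toNat := by omega
            have hc : d1.contains (PySem.Str.join "" (co.map (fun c => String.ofList [c]))) = true := by
              apply hcont
              rw [PySem.List.combinations_map]
              exact List.mem_map_of_mem (by rw [← hr']; exact hco)
            simp only [hc, Bool.not_true, Bool.and_false, Bool.false_eq_true, if_false]
          · have hkne : (PySem.Str.len (PySem.Str.join "" (co.map (fun c => String.ofList [c]))) == k) = false := by
              simp only [pv_pin_len, beq_eq_false_iff_ne, ne_eq]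
              rw [hlen]
              omega
            simp only [hkne, Bool.false_and, Bool.false_eq_true, if_false]),
        PySem.List.foldl_ignore]),
    PySem.List.foldl_ignore]

lemma pv_range_if' {D : Type} (k : Int) (F : Int → D → D) (a b : Int) (d : D) :
    (PySem.List.pyRange a b).foldl (fun d r => if r = k then F r d else d) d
    = if a ≤ k ∧ k < b then F k d else d :=
  pv_range_if k F (b - a).toNat a b rfl d

-- A's first loop collapses to a single insertion fold over combinations of size pin_length
lemma pv_first_loop (cs : List Char) (k : Int) (d : PySem.Dict String (List String)) :
    (PySem.List.pyRange 2 (↑(cs.map (fun c => String.ofList [c])).length + 1)).foldl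
      (fun d1 r =>
        (PySem.List.combinations (cs.map (fun c => String.ofList [c])) r.toNat).foldl
          (fun d1 combo =>
            if PySem.Str.len (PySem.Str.join "" combo) == k
            then d1.insert (PySem.Str.join "" combo) combo else d1) d1) d
    = if 2 ≤ k then
        (PySem.List.combinations (cs.map (fun c => String.ofList [c])) k.toNat).foldl
          (fun d combo => d.insert (PySem.Str.join "" combo) combo) d
      else d := by
  rw [PySem.List.foldl_congr_mem _ _
    (fun d1 r => if r = k then
        (PySem.List.combinations (cs.map (fun c => String.ofList [c])) k.toNat).foldl
          (fun d combo => d.insert (PySem.Str.join "" combo) combo) d1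
      else d1) d
    (by
      intro acc r hr
      rw [PySem.List.mem_pyRange_one] at hr
      dsimp only
      rw [pv_innerA]
      have h1 : ((r.toNat : Int)) = r := by omega
      rw [h1]
      by_cases h : r = k
      · rw [if_pos h, if_pos h, (by omega : r.toNat = k.toNat)]
      · rw [if_neg h, if_neg h]),
    pv_range_if']
  by_cases h2 : 2 ≤ k
  · by_cases h3 : k < ↑(cs.map (fun c => String.ofList [c])).length + 1
    · rw [if_pos ⟨h2, h3⟩, if_pos h2]
    · have hnil : (cs.map (fun c => String.ofList [c])).length < k.toNat := by
        simp only [List.length_map] at h3 ⊢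
        omega
      rw [if_neg (fun hh => h3 hh.2), if_pos h2,
        PySem.List.combinations_eq_nil_of_length_lt _ hnil, List.foldl_nil]
  · rw [if_neg (fun hh => h2 hh.1), if_neg h2]

-- the second-loop test against an empty first dict reduces to the length test
lemma pv_innerA2 (cs : List Char) (r : Nat) (k : Int)
    (d : PySem.Dict String (List String)) :
    (PySem.List.combinations (cs.map (fun c => String.ofList [c])) r).foldl
      (fun d combo =>
        if PySem.Str.len (PySem.Str.join "" combo) == k
            && !((PySem.Dict.empty : PySem.Dict String (List String)).contains (PySem.Str.join "" combo))
        then d.insert (PySem.Str.join "" combo) combo else d) d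
    = if (r : Int) = k then
        (PySem.List.combinations (cs.map (fun c => String.ofList [c])) r).foldl
          (fun d combo => d.insert (PySem.Str.join "" combo) combo) d
      else d := by
  rw [← pv_innerA]
  apply PySem.List.foldl_congr_mem
  intro acc combo hcombo
  rw [PySem.Dict.contains_empty, Bool.not_false, Bool.and_true]

-- A's second loop: identity unless pin_length = 1, in which case it inserts the single digits
lemma pv_second_loop_full (cs : List Char) (k : Int)
    (d1 d2 : PySem.Dict String (List String))
    (hcont : 2 ≤ k → ∀ co ∈ PySem.List.combinations (cs.map (fun c => String.ofList [c])) k.toNat,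
        d1.contains (PySem.Str.join "" co) = true)
    (hd1 : k = 1 → d1 = PySem.Dict.empty) :
    (PySem.List.pyRange 1 (↑(cs.map (fun c => String.ofList [c])).length + 1)).foldl
      (fun d2 r =>
        (PySem.List.combinations (cs.map (fun c => String.ofList [c])) r.toNat).foldl
          (fun d2 combo =>
            if PySem.Str.len (PySem.Str.join "" combo) == k && !(d1.contains (PySem.Str.join "" combo))
            then d2.insert (PySem.Str.join "" combo) combo else d2)
          d2)
      d2
    = if k = 1 then cs.foldl (fun d c => d.insert (String.ofList [c]) [String.ofList [c]]) d2 else d2 := by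
  by_cases hk2 : 2 ≤ k
  · rw [pv_second_loop cs k d1 d2 (hcont hk2), if_neg (by omega)]
  · by_cases hk1 : k = 1
    · subst hk1
      rw [hd1 rfl]
      rw [PySem.List.foldl_congr_mem _ _
        (fun d2 r => if r = (1 : Int) then
            (PySem.List.combinations (cs.map (fun c => String.ofList [c])) (1:Int).toNat).foldl
              (fun d combo => d.insert (PySem.Str.join "" combo) combo) d2
          else d2) d2
        (by
          intro acc r hr
          rw [PySem.List.mem_pyRange_one] at hr
          dsimp only
          rw [pv_innerA2]
          have h1 : ((r.toNat : Int)) = r := by omega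
          rw [h1]
          by_cases h : r = 1
          · rw [if_pos h, if_pos h, h]
          · rw [if_neg h, if_neg h]),
        pv_range_if']
      by_cases hcs : (1 : Int) < ↑(cs.map (fun c => String.ofList [c])).length + 1
      · rw [if_pos ⟨le_refl _, hcs⟩, if_pos rfl]
        have h1 : ((1 : Int)).toNat = 1 := rfl
        rw [h1, PySem.List.combinations_one, List.foldl_map, List.foldl_map]
        apply PySem.List.foldl_congr_mem
        intro acc c hc
        rw [pv_pin_singleton]
      · rw [if_neg (fun hh => hcs hh.2), if_pos rfl]
        have hlen : cs.length = 0 := by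
          simp only [List.length_map] at hcs
          omega
        rw [List.eq_nil_of_length_eq_zero hlen, List.foldl_nil]
    · -- k ≤ 0: every pin has positive length, nothing matches
      rw [if_neg hk1]
      rw [PySem.List.foldl_congr_mem _ _ (fun acc _ => acc) d2
        (by
          intro acc r hr
          rw [PySem.List.mem_pyRange_one] at hr
          rw [PySem.List.foldl_congr_mem _ _ (fun acc _ => acc) acc
            (by
              intro acc' combo hcombo
              rw [PySem.List.combinations_map, List.mem_map] at hcombo
              obtain ⟨co, hco, rfl⟩ := hcombo
              have hlen := PySem.List.length_of_mem_combinations hco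
              have hkne : (PySem.Str.len (PySem.Str.join "" (co.map (fun c => String.ofList [c]))) == k) = false := by
                simp only [pv_pin_len, beq_eq_false_iff_ne, ne_eq]
                rw [hlen]
                omega
              simp only [hkne, Bool.false_and, Bool.false_eq_true, if_false]),
            PySem.List.foldl_ignore]),
        PySem.List.foldl_ignore]

-- the whole dates loop of A, with both dicts collapsed to B's folds
lemma pv_dates (k : Int) :
    ∀ (dates : List String) (d1 d2 : PySem.Dict String (List String)),
      (k = 1 → d1 = PySem.Dict.empty) →
      dates.foldl
        (fun (st : PySem.Dict String (List String) × PySem.Dict String (List String)) date =>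
          ((PySem.List.pyRange 2 (↑((PySem.Str.replace date "-" "").toList.map (fun c => String.ofList [c])).length + 1)).foldl
          (fun d1 r =>
            (PySem.List.combinations ((PySem.Str.replace date "-" "").toList.map (fun c => String.ofList [c])) r.toNat).foldl
              (fun d1 combo =>
                if PySem.Str.len (PySem.Str.join "" combo) == k
                then d1.insert (PySem.Str.join "" combo) combo else d1) d1) st.1,
           (PySem.List.pyRange 1 (↑((PySem.Str.replace date "-" "").toList.map (fun c => String.ofList [c])).length + 1)).foldl
            (fun d2 r =>
              (PySem.List.combinations ((PySem.Str.replace date "-" "").toList.map (fun c => String.ofList [c])) r.toNat).foldl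
                (fun d2 combo =>
                  if PySem.Str.len (PySem.Str.join "" combo) == k
                      && !(((PySem.List.pyRange 2 (↑((PySem.Str.replace date "-" "").toList.map (fun c => String.ofList [c])).length + 1)).foldl
          (fun d1 r =>
            (PySem.List.combinations ((PySem.Str.replace date "-" "").toList.map (fun c => String.ofList [c])) r.toNat).foldl
              (fun d1 combo =>
                if PySem.Str.len (PySem.Str.join "" combo) == k
                then d1.insert (PySem.Str.join "" combo) combo else d1) d1) st.1).contains (PySem.Str.join "" combo))
                  then d2.insert (PySem.Str.join "" combo) combo else d2) d2) st.2))
        (d1, d2)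
      = ((if 2 ≤ k then
            dates.foldl
              (fun d date =>
                if k ≤ ↑((PySem.Str.replace date "-" "").toList.map (fun c => String.ofList [c])).length then
                  (PySem.List.combinations ((PySem.Str.replace date "-" "").toList.map (fun c => String.ofList [c])) k.toNat).foldl
                    (fun d combo => d.insert (PySem.Str.join "" combo) combo) d
                else d) d1
          else d1),
         (if k = 1 then
            dates.foldl
              (fun d date =>
                (PySem.Str.replace date "-" "").toList.foldl
                  (fun d c => d.insert (String.ofList [c]) [String.ofList [c]]) d) d2
          else d2)) := by
  intro dates
  induction dates with
  | nil =>
    intro d1 d2 _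
    simp
  | cons date dates ih =>
    intro d1 d2 hd1
    rw [List.foldl_cons]
    dsimp only
    rw [pv_first_loop]
    rw [pv_second_loop_full ((PySem.Str.replace date "-" "").toList) k _ d2
      (by
        intro h2 co hco
        rw [if_pos h2]
        exact pv_contains_after _ _ _ hco)
      (by
        intro h1
        rw [if_neg (by omega)]
        exact hd1 h1)]
    rw [ih _ _ (by
      intro h1
      rw [if_neg (by omega)]
      exact hd1 h1)]
    by_cases h2 : 2 ≤ k
    · have h1 : ¬ k = 1 := by omega
      simp only [if_pos h2, if_neg h1, List.foldl_cons]
      by_cases hg : k ≤ (↑(((PySem.Str.replace date "-" "").toList.map (fun c => String.ofList [c])).length) : Int)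
      · rw [if_pos hg]
      · have hlen : (((PySem.Str.replace date "-" "").toList.map (fun c => String.ofList [c])).length) < k.toNat := by
          omega
        rw [if_neg hg, PySem.List.combinations_eq_nil_of_length_lt _ hlen, List.foldl_nil]
    · by_cases h1 : k = 1
      · simp only [if_neg h2, if_pos h1, List.foldl_cons]
      · simp only [if_neg h2, if_neg h1]

-- ===== VERDICT (by name: the statement is the Claim_ definition above) =====
theorem generate_date_pins_spec : Claim_equal_generate_date_pins := by
  intro dates k _
  unfold Spec_generate_date_pins
  simp only [generate_date_pins, generate_date_pins_alt, pvExtractDateDigits, PySem.List.len_eq]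
  exact congrArg (fun p => (p.1.items, p.2.items))
    (pv_dates k dates PySem.Dict.empty PySem.Dict.empty (fun _ => rfl))
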